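-- pv_equiv track=rewrite | github.com/Micah-Ribbens/Flash-Cards | card.py | get_words_and_location
-- ===== SOURCE A (Python) =====
-- def get_words_and_location(text):
--     word = ""
--     words_and_locations = {}
--     for x in range(len(text)):
--         ch = text[x]
--         if ch == " ":
--             words_and_locations[x] = word
--             word = ""
--
--         else:
--             word += ch
--     # The last word won't have a space after it
--     words_and_locations[len(text)] = word
--
--     return words_and_locations
-- ===== SOURCE B (Python) =====
-- def get_words_and_location(text):
--     result = {}
--     pos = 0
--     for word in text.split(" "):
--         pos += len(word)
--         result[pos] = word
--         pos += 1
--     return result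
-- ===== Notes on version B (the rewrite author's own statement) =====
-- stated objective: faster
-- what changed: B replaces A's per-character Python loop with one call to str.split on the space separator plus a running position counter that computes each word's end location arithmetically.
import Mathlib
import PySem

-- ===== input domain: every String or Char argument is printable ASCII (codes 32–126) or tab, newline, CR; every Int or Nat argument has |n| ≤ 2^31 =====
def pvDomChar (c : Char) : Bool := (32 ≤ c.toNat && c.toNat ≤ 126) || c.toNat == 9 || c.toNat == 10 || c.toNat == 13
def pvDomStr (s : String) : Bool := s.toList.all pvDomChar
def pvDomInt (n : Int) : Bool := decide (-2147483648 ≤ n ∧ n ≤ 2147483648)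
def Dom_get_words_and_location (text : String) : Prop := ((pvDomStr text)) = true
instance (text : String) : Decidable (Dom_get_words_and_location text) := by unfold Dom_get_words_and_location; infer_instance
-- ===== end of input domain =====

-- B splits the text once (str.split on the space separator) and computes each word's end location with a running
-- position counter, instead of A's character-by-character scan with a word accumulator.

-- ===== PORT A =====
-- A's for-loop over range(len(text)) with text[x], as structural recursion carrying the
-- index x; the growing Python string `word` is kept as List Char (exact: += on str).
def pvALoop : List Char → Int → List Char → PySem.Dict Int String → PySem.Dict Int String
  | [], x, word, d => d.insert x (String.ofList word)      -- words_and_locations[len(text)] = word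
  | c :: rest, x, word, d =>
      if c = ' ' then pvALoop rest (x + 1) [] (d.insert x (String.ofList word))
      else pvALoop rest (x + 1) (word ++ [c]) d

def get_words_and_location (text : String) : List (Int × String) :=
  (pvALoop text.toList 0 [] PySem.Dict.empty).items

-- ===== PORT B =====
-- for word in text.split(" "): pos += len(word); result[pos] = word; pos += 1
def pvBLoop : List (List Char) → Int → PySem.Dict Int String → PySem.Dict Int String
  | [], _, d => d
  | w :: ws, pos, d =>
      pvBLoop ws (pos + (w.length : Int) + 1) (d.insert (pos + (w.length : Int)) (String.ofList w))

def get_words_and_location_alt (text : String) : List (Int × String) :=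
  (pvBLoop (PySem.Chars.splitOn text.toList [' ']) 0 PySem.Dict.empty).items

-- ===== PRECONDITION & SPEC =====
def Spec_get_words_and_location (text : String) (out : List (Int × String)) : Prop := out = get_words_and_location_alt text
instance (text : String) (out : List (Int × String)) : Decidable (Spec_get_words_and_location text out) := by unfold Spec_get_words_and_location; infer_instance

-- ===== CLAIM (what is proved, stated in full; the proofs are below) =====
def Claim_equal_get_words_and_location : Prop := ∀ (text : String), Dom_get_words_and_location text → Spec_get_words_and_location text (get_words_and_location text)

-- ===== LEMMAS AND PROOFS =====

-- proof-side characterisation of splitting on a single space, with the pending prefix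
def pvSplitPre : List Char → List Char → List (List Char)
  | pre, [] => [pre]
  | pre, c :: rest => if c = ' ' then pre :: pvSplitPre [] rest else pvSplitPre (pre ++ [c]) rest

theorem pvGo_eq (l : List Char) : ∀ (fuel : Nat) (cur : List Char) (acc : List (List Char)),
    l.length < fuel →
    PySem.Chars.splitOn.go [' '] fuel l cur acc = acc.reverse ++ pvSplitPre cur.reverse l := by
  induction l with
  | nil =>
      intro fuel cur acc h
      cases fuel with
      | zero => omega
      | succ f => simp [PySem.Chars.splitOn.go, pvSplitPre]
  | cons c rest ih =>
      intro fuel cur acc h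
      cases fuel with
      | zero => simp at h
      | succ f =>
        rw [PySem.Chars.splitOn.go]
        by_cases hc : c = ' '
        · subst hc
          simp only [List.isPrefixOf, BEq.rfl, Bool.true_and, if_true,
            List.length_cons, List.length_nil, List.drop_succ_cons, List.drop_zero]
          rw [ih f [] (cur.reverse :: acc) (by simpa using h)]
          simp [pvSplitPre]
        · have hpre : ([' '].isPrefixOf (c :: rest)) = false := by
            simp [List.isPrefixOf]
            exact fun hh => (hc hh.symm).elim
          rw [hpre]
          simp only [if_false, Bool.false_eq_true]
          rw [ih f (c :: cur) acc (by simpa using h)]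
          simp [pvSplitPre, hc]

theorem pvSplitOn_eq (cs : List Char) :
    PySem.Chars.splitOn cs [' '] = pvSplitPre [] cs := by
  rw [PySem.Chars.splitOn, pvGo_eq cs (cs.length + 1) [] [] (by omega)]
  simp

theorem pvLoop_eq (cs : List Char) : ∀ (x : Int) (word : List Char) (d : PySem.Dict Int String),
    pvALoop cs x word d = pvBLoop (pvSplitPre word cs) (x - (word.length : Int)) d := by
  induction cs with
  | nil =>
      intro x word d
      simp [pvALoop, pvSplitPre, pvBLoop]
  | cons c rest ih =>
      intro x word d
      by_cases hc : c = ' '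
      · subst hc
        simp only [pvALoop, pvSplitPre, if_true]
        rw [ih (x + 1) [] (d.insert x (String.ofList word))]
        simp only [pvBLoop, List.length_nil, Nat.cast_zero, sub_zero]
        have hx : x - (word.length : Int) + (word.length : Int) = x := by ring
        rw [hx]
      · simp only [pvALoop, pvSplitPre, hc, if_false]
        rw [ih (x + 1) (word ++ [c]) d]
        have : x + 1 - ((word ++ [c]).length : Int) = x - (word.length : Int) := by
          simp only [List.length_append, List.length_cons, List.length_nil]; push_cast; ring
        rw [this]

-- ===== VERDICT (by name: the statement is the Claim_ definition above) =====
theorem get_words_and_location_spec : Claim_equal_get_words_and_location := by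
  intro text _
  unfold Spec_get_words_and_location get_words_and_location get_words_and_location_alt
  rw [pvSplitOn_eq, pvLoop_eq]
  simp
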